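-- pv_equiv track=rewrite | github.com/programmic/Terminal_Game | test.py | readSegment
-- ===== SOURCE A (Python) =====
-- def readSegment(text: str):
--     frag: str = ""
--     cmd: str = ""
--     stop: bool = False
--     for i in text:
--         if not i == "$" and not stop:
--             frag += i
--         elif i == "$" and stop:
--             break
--         else:
--             stop = True
--             if i != "$": cmd += i
--     return (frag, cmd)
-- ===== SOURCE B (Python) =====
-- def readSegment(text: str):
--     first = text.find('$')
--     if first == -1:
--         return (text, '')
--     second = text.find('$', first + 1)
--     cmd = text[first + 1:second] if second != -1 else text[first + 1:]
--     return (text[:first], cmd)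
-- ===== Notes on version B (the rewrite author's own statement) =====
-- stated objective: idiomatic
-- what changed: Replaced the char-by-char accumulation loop with a stop flag and break by computing the two delimiter positions with str.find and returning slices; B has no Python-level loop.
import Mathlib
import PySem

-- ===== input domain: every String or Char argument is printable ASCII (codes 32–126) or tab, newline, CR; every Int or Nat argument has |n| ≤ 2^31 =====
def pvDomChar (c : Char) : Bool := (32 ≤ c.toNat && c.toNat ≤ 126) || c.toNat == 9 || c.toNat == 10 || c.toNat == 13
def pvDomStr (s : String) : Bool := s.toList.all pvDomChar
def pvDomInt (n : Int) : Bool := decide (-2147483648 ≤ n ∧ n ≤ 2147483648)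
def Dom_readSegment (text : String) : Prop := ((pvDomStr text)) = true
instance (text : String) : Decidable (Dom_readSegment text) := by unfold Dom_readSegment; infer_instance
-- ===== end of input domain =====

-- B replaces A's char-by-char loop (stop flag + break) with two str.find calls and slicing (no loop); objective: idiomatic.

-- ===== PORT A =====
-- the Python for-loop with its (frag, cmd, stop) state and the break, as structural recursion
def readSegmentGo (cs : List Char) (frag cmd : List Char) (stop : Bool) : String × String :=
  match cs with
  | [] => (String.ofList frag, String.ofList cmd)
  | i :: rest =>
    if ¬ i = '$' ∧ ¬ stop = true then readSegmentGo rest (frag ++ [i]) cmd stop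
    else if i = '$' ∧ stop = true then (String.ofList frag, String.ofList cmd)
    else readSegmentGo rest frag (if i ≠ '$' then cmd ++ [i] else cmd) true

def readSegment (text : String) : String × String :=
  readSegmentGo text.toList [] [] false

-- ===== PORT B =====
def readSegment_alt (text : String) : String × String :=
  let first := PySem.Str.find text "$"
  if first = -1 then (text, "")
  else
    let second := PySem.Str.findFrom text "$" (first + 1)
    let cmd := if second ≠ -1 then PySem.Str.slice text (some (first + 1)) (some second)
               else PySem.Str.slice text (some (first + 1)) none
    (PySem.Str.slice text none (some first), cmd)

-- ===== PRECONDITION & SPEC =====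
def Spec_readSegment (text : String) (out : String × String) : Prop := out = readSegment_alt text
instance (text : String) (out : String × String) : Decidable (Spec_readSegment text out) := by unfold Spec_readSegment; infer_instance

-- ===== CLAIM (what is proved, stated in full; the proofs are below) =====
def Claim_equal_readSegment : Prop := ∀ (text : String), Dom_readSegment text → Spec_readSegment text (readSegment text)

-- ===== LEMMAS AND PROOFS =====

-- a singleton is a prefix of l.drop i exactly when l[i]? is that char
theorem pv_pfx_drop (c : Char) (l : List Char) (i : Nat) :
    [c] <+: l.drop i ↔ l[i]? = some c := by
  rw [← List.head?_drop]
  cases h : l.drop i with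
  | nil => simp
  | cons x xs => simp [List.cons_prefix_cons, eq_comm]

-- the char at the takeWhile boundary is c (when c occurs)
theorem pv_tw_getElem (c : Char) (cs : List Char) (h : c ∈ cs) :
    cs[(cs.takeWhile (fun x => x != c)).length]? = some c := by
  induction cs with
  | nil => simp at h
  | cons a l ih =>
    by_cases hac : a = c
    · subst hac; simp
    · have hm : c ∈ l := by
        rcases List.mem_cons.mp h with h' | h'
        · exact absurd h'.symm hac
        · exact h'
      simp [hac, ih hm]

-- no c strictly before the takeWhile boundary
theorem pv_tw_before (c : Char) (cs : List Char) (i : Nat)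
    (h : i < (cs.takeWhile (fun x => x != c)).length) : cs[i]? ≠ some c := by
  induction cs generalizing i with
  | nil => simp at h
  | cons a l ih =>
    by_cases hac : a = c
    · subst hac; simp at h
    · cases i with
      | zero => simp [hac]
      | succ n =>
        have h' : n < (l.takeWhile (fun x => x != c)).length := by
          simpa [List.takeWhile_cons, hac] using h
        simpa using ih n h'

-- find with a single-char needle is the takeWhile boundary (or -1)
theorem pv_find_singleton (c : Char) (cs : List Char) :
    PySem.Chars.find cs [c] =
      if c ∈ cs then ((cs.takeWhile (fun x => x != c)).length : Int) else -1 := by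
  by_cases h : c ∈ cs
  · simp only [h, if_true]
    have hne : PySem.Chars.find cs [c] ≠ -1 := by
      rw [Ne, PySem.Chars.find_eq_neg_one_iff]
      intro hni
      obtain ⟨s, t, rfl⟩ := List.append_of_mem h
      exact hni ⟨s, t, by simp⟩
    have hnn : 0 ≤ PySem.Chars.find cs [c] := by
      have := PySem.Chars.neg_one_le_find (s := cs) (sub := [c])
      omega
    obtain ⟨hp, hmin⟩ := PySem.Chars.find_spec hnn
    have hjc : cs[(PySem.Chars.find cs [c]).toNat]? = some c :=
      (pv_pfx_drop c cs _).mp hp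
    have h1 : ¬ (PySem.Chars.find cs [c]).toNat < (cs.takeWhile (fun x => x != c)).length :=
      fun hlt => pv_tw_before c cs _ hlt hjc
    have h2 : ¬ (cs.takeWhile (fun x => x != c)).length < (PySem.Chars.find cs [c]).toNat :=
      fun hlt => hmin _ hlt ((pv_pfx_drop c cs _).mpr (pv_tw_getElem c cs h))
    omega
  · simp only [h, if_false]
    rw [PySem.Chars.find_eq_neg_one_iff]
    intro hinf
    exact h (hinf.subset (by simp))

-- takeWhile as take, dropWhile as drop
theorem pv_tw_take (p : Char → Bool) (l : List Char) :
    l.takeWhile p = l.take (l.takeWhile p).length :=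
  List.prefix_iff_eq_take.mp (l.takeWhile_prefix p)

theorem pv_dw_drop (p : Char → Bool) (l : List Char) :
    l.dropWhile p = l.drop (l.takeWhile p).length := by
  have h1 : l.takeWhile p ++ l.dropWhile p = l := List.takeWhile_append_dropWhile
  have h2 : l.take (l.takeWhile p).length ++ l.drop (l.takeWhile p).length = l :=
    List.take_append_drop _ l
  rw [pv_tw_take p l] at h1
  exact List.append_cancel_left (h1.trans h2.symm)

-- A's loop after the stop flag is set: it appends chars until the next '$'
theorem pv_goA_stopped (v frag cmd : List Char) :
    readSegmentGo v frag cmd true =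
      (String.ofList frag, String.ofList (cmd ++ v.takeWhile (fun x => x != '$'))) := by
  induction v generalizing cmd with
  | nil => simp [readSegmentGo]
  | cons i rest ih =>
    by_cases hi : i = '$'
    · subst hi; simp [readSegmentGo]
    · simp [readSegmentGo, hi, ih]

-- A's loop from the start: frag is the pre-'$' prefix, cmd the segment after it
theorem pv_goA (cs : List Char) (frag : List Char) :
    readSegmentGo cs frag [] false =
      (String.ofList (frag ++ cs.takeWhile (fun x => x != '$')),
       String.ofList (((cs.dropWhile (fun x => x != '$')).drop 1).takeWhile (fun x => x != '$'))) := by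
  induction cs generalizing frag with
  | nil => simp [readSegmentGo]
  | cons i rest ih =>
    by_cases hi : i = '$'
    · subst hi
      simp [readSegmentGo, pv_goA_stopped]
    · simp [readSegmentGo, hi, ih (frag ++ [i])]

-- the part of the list after the first delimiter
theorem pv_tail_eq (p : Char → Bool) (l : List Char) :
    (l.dropWhile p).drop 1 = l.drop ((l.takeWhile p).length + 1) := by
  rw [pv_dw_drop, List.drop_drop, Nat.add_comm]

theorem pv_tw_all (c : Char) (l : List Char) (h : c ∉ l) :
    l.takeWhile (fun x => x != c) = l :=
  List.takeWhile_eq_self_iff.mpr (fun x hx => by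
    simp only [bne_iff_ne, ne_eq]; exact fun hxe => h (hxe ▸ hx))

-- main equivalence on an arbitrary string
theorem pv_main (text : String) : readSegment text = readSegment_alt text := by
  unfold readSegment readSegment_alt
  rw [pv_goA text.toList []]
  simp only [List.nil_append]
  have hdollar : ("$" : String).toList = ['$'] := by decide
  have hfind : PySem.Str.find text "$" = PySem.Chars.find text.toList ['$'] := by
    simp [hdollar]
  by_cases h : '$' ∈ text.toList
  · -- a '$' occurs
    have htl : text.toList[(text.toList.takeWhile (fun x => x != '$')).length]? = some '$' :=
      pv_tw_getElem '$' text.toList h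
    have hlt : (text.toList.takeWhile (fun x => x != '$')).length < text.toList.length := by
      exact (List.getElem?_eq_some_iff.mp htl).choose
    set tl := (text.toList.takeWhile (fun x => x != '$')).length with htldef
    have hfst : PySem.Str.find text "$" = (tl : Int) := by
      rw [hfind, pv_find_singleton '$' text.toList, if_pos h, htldef]
    rw [hfst]
    rw [if_neg (by omega)]
    have hcast : (tl : Int) + 1 = ((tl + 1 : Nat) : Int) := by push_cast; ring
    have hsnd : PySem.Str.findFrom text "$" ((tl : Int) + 1) =
        PySem.Chars.findFrom text.toList ['$'] ((tl + 1 : Nat) : Int) := by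
      rw [hcast]; simp [hdollar]
    rw [hsnd]
    by_cases hv : '$' ∈ text.toList.drop (tl + 1)
    · -- a second '$' occurs
      have e2 : PySem.Chars.findFrom text.toList ['$'] ((tl + 1 : Nat) : Int) =
          ((tl + 1 : Nat) : Int) +
            (((text.toList.drop (tl + 1)).takeWhile (fun x => x != '$')).length : Int) := by
        rw [PySem.Chars.findFrom_natCast text.toList ['$'] (tl + 1) (by omega),
          pv_find_singleton '$' (text.toList.drop (tl + 1)), if_pos hv, if_neg (by omega)]
      rw [e2, if_pos (by omega)]
      refine Prod.ext ?_ ?_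
      · apply String.toList_inj.mp
        rw [String.toList_ofList, PySem.Str.toList_slice, PySem.Chars.slice_eq_listSlice,
          PySem.List.slice_to_natCast]
        exact pv_tw_take _ _
      · apply String.toList_inj.mp
        rw [String.toList_ofList, PySem.Str.toList_slice, PySem.Chars.slice_eq_listSlice]
        rw [hcast, PySem.List.slice_natCast_add]
        rw [pv_tail_eq, ← htldef]
        exact pv_tw_take _ _
    · -- no second '$'
      have e2 : PySem.Chars.findFrom text.toList ['$'] ((tl + 1 : Nat) : Int) = -1 := by
        rw [PySem.Chars.findFrom_natCast text.toList ['$'] (tl + 1) (by omega),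
          pv_find_singleton '$' (text.toList.drop (tl + 1)), if_neg hv, if_pos rfl]
      rw [e2, if_neg (by simp)]
      refine Prod.ext ?_ ?_
      · apply String.toList_inj.mp
        rw [String.toList_ofList, PySem.Str.toList_slice, PySem.Chars.slice_eq_listSlice,
          PySem.List.slice_to_natCast]
        exact pv_tw_take _ _
      · apply String.toList_inj.mp
        rw [String.toList_ofList, PySem.Str.toList_slice, PySem.Chars.slice_eq_listSlice]
        rw [hcast, PySem.List.slice_from_natCast]
        rw [pv_tail_eq, ← htldef]
        exact pv_tw_all '$' _ hv
  · -- no '$' at all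
    have hfst : PySem.Str.find text "$" = -1 := by
      rw [hfind, pv_find_singleton '$' text.toList, if_neg h]
    rw [hfst, if_pos rfl]
    have hdw : text.toList.dropWhile (fun x => x != '$') = [] :=
      List.dropWhile_eq_nil_iff.mpr (fun x hx => by
        simp only [bne_iff_ne, ne_eq]; exact fun hxe => h (hxe ▸ hx))
    rw [pv_tw_all '$' text.toList h, hdw]
    refine Prod.ext ?_ ?_
    · exact String.ofList_toList
    · rfl

-- ===== VERDICT (by name: the statement is the Claim_ definition above) =====
theorem readSegment_spec : Claim_equal_readSegment := by
  intro text _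
  unfold Spec_readSegment
  exact pv_main text
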